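-- pv_equiv track=rewrite | github.com/vedantmane12/mental-wellness-companion | src/safety/safety_monitor.py | _temper_promises
-- ===== SOURCE A (Python) =====
-- def _temper_promises(response: str) -> str:
--     """Temper overpromises in response"""
--     replacements = {
--         "will definitely": "may",
--         "guaranteed to": "could potentially",
--         "will cure": "might help with",
--         "will fix": "could improve",
--         "promise you": "hope that",
--         "100%": "very likely"
--     }
--
--     result = response
--     for old, new in replacements.items():
--         result = result.replace(old, new)
--     return result
-- ===== SOURCE B (Python) =====
-- def _temper_promises(response: str) -> str:
--     """Temper overpromises in response (single left-to-right pass)"""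
--     pairs = [
--         ("will definitely", "may"),
--         ("guaranteed to", "could potentially"),
--         ("will cure", "might help with"),
--         ("will fix", "could improve"),
--         ("promise you", "hope that"),
--         ("100%", "very likely"),
--     ]
--     out = []
--     i = 0
--     n = len(response)
--     while i < n:
--         for old, new in pairs:
--             if response.startswith(old, i):
--                 out.append(new)
--                 i += len(old)
--                 break
--         else:
--             out.append(response[i])
--             i += 1
--     return "".join(out)
-- ===== Notes on version B (the rewrite author's own statement) =====
-- stated objective: alternative
-- what changed: A makes six sequential full-string replace passes (one per phrase); B makes a single left-to-right pass that tries the six phrases at each position (same priority order), emitting replacements as it goes.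
import Mathlib
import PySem

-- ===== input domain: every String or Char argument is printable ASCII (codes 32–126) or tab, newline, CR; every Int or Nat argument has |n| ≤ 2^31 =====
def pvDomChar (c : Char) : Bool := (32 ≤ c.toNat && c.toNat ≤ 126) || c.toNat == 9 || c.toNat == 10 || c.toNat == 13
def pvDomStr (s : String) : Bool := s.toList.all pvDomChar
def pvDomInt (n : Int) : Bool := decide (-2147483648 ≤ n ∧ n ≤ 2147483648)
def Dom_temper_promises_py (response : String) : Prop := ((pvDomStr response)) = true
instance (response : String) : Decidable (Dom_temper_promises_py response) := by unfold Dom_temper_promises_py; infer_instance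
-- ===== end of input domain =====

-- B replaces A's six sequential full-string replace passes by ONE left-to-right scan that tries the
-- six phrases at each position (same priority order); same return value, alternative decomposition.

-- ===== PORT A =====
def temper_promises_py (response : String) : String :=
  let replacements : PySem.Dict String String := PySem.Dict.mk
    [("will definitely", "may"), ("guaranteed to", "could potentially"),
     ("will cure", "might help with"), ("will fix", "could improve"),
     ("promise you", "hope that"), ("100%", "very likely")]
  replacements.items.foldl (fun result kv => PySem.Str.replace result kv.1 kv.2) response

-- ===== PORT B =====
-- Source B's pairs list, as char lists
def pvPairs : List (List Char × List Char) :=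
  [("will definitely".toList, "may".toList),
   ("guaranteed to".toList, "could potentially".toList),
   ("will cure".toList, "might help with".toList),
   ("will fix".toList, "could improve".toList),
   ("promise you".toList, "hope that".toList),
   ("100%".toList, "very likely".toList)]

-- Source B's while loop: at position i try each pair in order (`response.startswith(old, i)`);
-- on a match emit the replacement and advance by len(old) (here: drop (len(old)-1) of the tail),
-- otherwise emit the character and advance by 1.
def pvScanGo (pairs : List (List Char × List Char)) : List Char → List Char
  | [] => []
  | c :: t =>
    match pairs.find? (fun kv => kv.1.isPrefixOf (c :: t)) with
    | some kv => kv.2 ++ pvScanGo pairs (t.drop (kv.1.length - 1))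
    | none => c :: pvScanGo pairs t
termination_by s => s.length
decreasing_by
  · simp [List.length_drop]
  · exact Nat.lt_succ_self _

def temper_promises_py_alt (response : String) : String :=
  String.ofList (pvScanGo pvPairs response.toList)

-- ===== PRECONDITION & SPEC =====
def Spec_temper_promises_py (response : String) (out : String) : Prop := out = temper_promises_py_alt response
instance (response : String) (out : String) : Decidable (Spec_temper_promises_py response out) := by unfold Spec_temper_promises_py; infer_instance

-- ===== CLAIM (what is proved, stated in full; the proofs are below) =====
def Claim_equal_temper_promises_py : Prop := ∀ (response : String), Dom_temper_promises_py response → Spec_temper_promises_py response (temper_promises_py response)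

-- ===== LEMMAS AND PROOFS =====

-- Python's str.replace as a plain structural recursion (old ≠ [] in every use below)
def rep1 (old new : List Char) : List Char → List Char
  | [] => []
  | c :: t =>
    if old.isPrefixOf (c :: t) then new ++ rep1 old new (t.drop (old.length - 1))
    else c :: rep1 old new t
termination_by s => s.length
decreasing_by
  · simp [List.length_drop]
  · exact Nat.lt_succ_self _

-- the nonempty proper suffixes of the six keys
def pvSUF : List (List Char) :=
  pvPairs.flatMap (fun kv =>
    (List.range kv.1.length).filterMap (fun d => if d = 0 then none else some (kv.1.drop d)))

-- finite facts about the fixed table: keys are nonempty; no key starts inside a replacement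
-- block or inside/straddling another key's occurrence (checked by `decide`)
lemma fact_key_ne : ∀ kv ∈ pvPairs, kv.1 ≠ [] := by decide
lemma fact_repl : ∀ a ∈ pvPairs, ∀ b ∈ pvPairs, ∀ p < a.2.length,
    ¬ (a.2.drop p <+: b.1) ∧ ¬ (b.1 <+: a.2.drop p) := by decide
lemma fact_sufkey : ∀ m ∈ pvSUF, ∀ b ∈ pvPairs, ¬ (m <+: b.1) ∧ ¬ (b.1 <+: m) := by decide
lemma fact_sufrepl : ∀ m ∈ pvSUF, ∀ a ∈ pvPairs, ¬ (m <+: a.2) ∧ ¬ (a.2 <+: m) := by decide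
lemma fact_suf_ne : ∀ m ∈ pvSUF, m ≠ [] := by decide
lemma fact_suf_tail : ∀ m ∈ pvSUF, m.tail ≠ [] → m.tail ∈ pvSUF := by decide
lemma fact_key_drop : ∀ kv ∈ pvPairs, ∀ p, 1 ≤ p → p < kv.1.length → kv.1.drop p ∈ pvSUF := by decide

-- PySem.Chars.replace.go computes rep1 (fuel irrelevance)
lemma go_eq_rep1 (old new : List Char) (ho : old ≠ []) :
    ∀ fuel l acc, l.length ≤ fuel →
      PySem.Chars.replace.go old new fuel l acc = acc.reverse ++ rep1 old new l := by
  intro fuel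
  induction fuel with
  | zero =>
    intro l acc hl
    have : l = [] := List.eq_nil_of_length_eq_zero (Nat.le_zero.mp hl)
    subst this
    simp [PySem.Chars.replace.go, rep1]
  | succ f ih =>
    intro l acc hl
    match l with
    | [] => simp [PySem.Chars.replace.go, rep1]
    | c :: t =>
      rw [PySem.Chars.replace.go]
      by_cases h : old.isPrefixOf (c :: t) = true
      · rw [if_pos h, rep1, if_pos h]
        have hd : List.drop old.length (c :: t) = t.drop (old.length - 1) := by
          cases old with | nil => exact absurd rfl ho | cons a b => simp
        have hlen : (t.drop (old.length - 1)).length ≤ f := by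
          simp at hl; simp [List.length_drop]; omega
        rw [hd, ih _ _ hlen]
        simp
      · rw [if_neg h, rep1, if_neg h, ih _ _ (by simpa using hl)]
        simp

lemma replace_eq_rep1 (old new s : List Char) (ho : old ≠ []) :
    PySem.Chars.replace s old new = rep1 old new s := by
  rw [PySem.Chars.replace, if_neg (by simp [List.isEmpty_iff, ho]),
    go_eq_rep1 old new ho s.length s [] (Nat.le_refl _)]
  simp

lemma not_prefix_append (k b u : List Char) (h1 : ¬ k <+: b) (h2 : ¬ b <+: k) :
    ¬ k <+: b ++ u :=
  fun h => (List.prefix_or_prefix_of_prefix h (List.prefix_append b u)).elim h1 h2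

-- rep1 passes unchanged through a block in which the key can start nowhere
lemma rep1_append_block (k v : List Char) :
    ∀ b u, (∀ p, p < b.length → ¬ k <+: b.drop p ++ u) →
      rep1 k v (b ++ u) = b ++ rep1 k v u := by
  intro b
  induction b with
  | nil => intro u _; simp
  | cons c b' ih =>
    intro u hb
    have h0 : ¬ k.isPrefixOf (c :: (b' ++ u)) = true := by
      rw [List.isPrefixOf_iff_prefix]
      simpa using hb 0 (by simp)
    rw [List.cons_append, rep1, if_neg h0,
      ih u (fun p hp => by simpa using hb (p+1) (by simpa using hp))]
    simp

lemma scanGo_cons_some (pairs : List (List Char × List Char)) (c : Char) (t : List Char)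
    (kv : List Char × List Char)
    (h : pairs.find? (fun kv => kv.1.isPrefixOf (c :: t)) = some kv) :
    pvScanGo pairs (c :: t) = kv.2 ++ pvScanGo pairs (t.drop (kv.1.length - 1)) := by
  rw [pvScanGo, h]

lemma scanGo_cons_none (pairs : List (List Char × List Char)) (c : Char) (t : List Char)
    (h : pairs.find? (fun kv => kv.1.isPrefixOf (c :: t)) = none) :
    pvScanGo pairs (c :: t) = c :: pvScanGo pairs t := by
  rw [pvScanGo, h]

lemma scan_zero (s : List Char) : pvScanGo (pvPairs.take 0) s = s := by
  induction s with
  | nil => simp [pvScanGo]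
  | cons c t ih => rw [scanGo_cons_none _ _ _ (by simp), ih]

-- the scan passes unchanged through a block in which no enabled key can start
lemma scan_append_block (pairs : List (List Char × List Char)) :
    ∀ b u, (∀ p, p < b.length → pairs.find? (fun kv => kv.1.isPrefixOf (b.drop p ++ u)) = none) →
      pvScanGo pairs (b ++ u) = b ++ pvScanGo pairs u := by
  intro b
  induction b with
  | nil => intro u _; simp
  | cons c b' ih =>
    intro u hb
    rw [List.cons_append, scanGo_cons_none _ _ _ (by simpa using hb 0 (by simp)),
      ih u (fun p hp => by simpa using hb (p+1) (by simpa using hp))]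
    simp

-- a proper key suffix is a prefix of the scan's output only where it is a prefix of the input
lemma scan_transparent (n : Nat) :
    ∀ N s, s.length ≤ N → ∀ m, m ∈ pvSUF →
      m <+: pvScanGo (pvPairs.take n) s → m <+: s := by
  intro N
  induction N with
  | zero =>
    intro s hs m hm hpre
    have : s = [] := List.eq_nil_of_length_eq_zero (Nat.le_zero.mp hs)
    subst this
    simpa [pvScanGo] using hpre
  | succ N ih =>
    intro s hs m hm hpre
    match s with
    | [] => simpa [pvScanGo] using hpre
    | c :: t =>
      cases hf : (pvPairs.take n).find? (fun kv => kv.1.isPrefixOf (c :: t)) with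
      | some kv =>
        rw [scanGo_cons_some _ _ _ _ hf] at hpre
        have hkv : kv ∈ pvPairs := List.take_subset _ _ (List.mem_of_find?_eq_some hf)
        rcases List.prefix_or_prefix_of_prefix hpre (List.prefix_append kv.2 _) with h | h
        · exact absurd h (fact_sufrepl m hm kv hkv).1
        · exact absurd h (fact_sufrepl m hm kv hkv).2
      | none =>
        rw [scanGo_cons_none _ _ _ hf] at hpre
        match m, fact_suf_ne m hm with
        | c' :: m', _ =>
          rw [List.cons_prefix_cons] at hpre
          obtain ⟨rfl, hm'⟩ := hpre
          match m', hm' with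
          | [], _ => simp
          | d :: m'', hm' =>
            have hmem : (d :: m'') ∈ pvSUF := fact_suf_tail _ hm (by simp)
            have : (d :: m'') <+: t := ih t (by simpa using hs) _ hmem hm'
            exact List.cons_prefix_cons.mpr ⟨rfl, this⟩

-- one pass of A's loop on top of the scan over the first n keys = the scan over the first n+1 keys
lemma step (n : Nat) (k v : List Char) (hkv : pvPairs[n]? = some (k, v)) :
    ∀ N s, s.length ≤ N →
      rep1 k v (pvScanGo (pvPairs.take n) s) = pvScanGo (pvPairs.take (n+1)) s := by
  have hkmem : (k, v) ∈ pvPairs := List.mem_of_getElem? hkv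
  have hkne : k ≠ [] := fact_key_ne _ hkmem
  have htake : pvPairs.take (n+1) = pvPairs.take n ++ [(k, v)] := by
    rw [List.take_add_one, hkv]; rfl
  intro N
  induction N with
  | zero =>
    intro s hs
    have : s = [] := List.eq_nil_of_length_eq_zero (Nat.le_zero.mp hs)
    subst this
    simp [pvScanGo, rep1]
  | succ N ih =>
    intro s hs
    match s with
    | [] => simp [pvScanGo, rep1]
    | c :: t =>
      cases hf : (pvPairs.take n).find? (fun kv => kv.1.isPrefixOf (c :: t)) with
      | some kv' =>
        have hkv'mem : kv' ∈ pvPairs := List.take_subset _ _ (List.mem_of_find?_eq_some hf)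
        have hf1 : (pvPairs.take (n+1)).find? (fun kv => kv.1.isPrefixOf (c :: t)) = some kv' := by
          rw [htake, List.find?_append, hf]; rfl
        rw [scanGo_cons_some _ _ _ _ hf, scanGo_cons_some _ _ _ _ hf1]
        rw [rep1_append_block k v kv'.2 _ (fun p hp =>
          not_prefix_append _ _ _ (fact_repl kv' hkv'mem (k, v) hkmem p hp).2
            (fact_repl kv' hkv'mem (k, v) hkmem p hp).1)]
        rw [ih _ (by simp at hs; simp [List.length_drop]; omega)]
      | none =>
        by_cases hp : k.isPrefixOf (c :: t) = true
        · obtain ⟨u, hu⟩ := List.isPrefixOf_iff_prefix.mp hp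
          have hf1 : (pvPairs.take (n+1)).find? (fun kv => kv.1.isPrefixOf (c :: t)) = some (k, v) := by
            rw [htake, List.find?_append, hf]
            simp [hp]
          rw [scanGo_cons_some _ _ _ _ hf1]
          have hscan : pvScanGo (pvPairs.take n) (c :: t) = k ++ pvScanGo (pvPairs.take n) u := by
            rw [← hu]
            apply scan_append_block
            intro p hplt
            rcases Nat.eq_zero_or_pos p with rfl | hp1
            · simpa [hu] using hf
            · apply List.find?_eq_none.mpr
              intro kv2 hkv2
              have hmem2 := List.take_subset _ _ hkv2
              have hsuf := fact_key_drop (k, v) hkmem p hp1 hplt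
              intro hcon
              exact (not_prefix_append kv2.1 (k.drop p) u (fact_sufkey _ hsuf kv2 hmem2).2
                (fact_sufkey _ hsuf kv2 hmem2).1) (List.isPrefixOf_iff_prefix.mp hcon)
          rw [hscan]
          have hstep : ∀ w, rep1 k v (k ++ w) = v ++ rep1 k v w := by
            intro w
            match k, hkne with
            | kc :: kt, _ =>
              rw [List.cons_append, rep1,
                if_pos (List.isPrefixOf_iff_prefix.mpr
                  (List.cons_prefix_cons.mpr ⟨rfl, List.prefix_append kt w⟩)),
                List.drop_left' (by simp)]
          rw [hstep]
          have hkt : ∃ kc kt, k = kc :: kt := by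
            match k, hkne with | kc :: kt, _ => exact ⟨kc, kt, rfl⟩
          obtain ⟨kc, kt, rfl⟩ := hkt
          have hct : kc = c ∧ kt ++ u = t := by
            rw [List.cons_append] at hu
            exact ⟨(List.cons.injEq _ _ _ _).mp hu |>.1, (List.cons.injEq _ _ _ _).mp hu |>.2⟩
          obtain ⟨rfl, htu⟩ := hct
          have hdrop : t.drop ((kc :: kt).length - 1) = u := by
            rw [← htu]; simp
          rw [hdrop]
          have hul : u.length ≤ N := by
            have := congrArg List.length htu
            simp at this hs
            omega
          rw [ih u hul]
        · have hf1 : (pvPairs.take (n+1)).find? (fun kv => kv.1.isPrefixOf (c :: t)) = none := by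
            rw [htake, List.find?_append, hf]
            simp [hp]
          rw [scanGo_cons_none _ _ _ hf, scanGo_cons_none _ _ _ hf1]
          have hnp : ¬ k.isPrefixOf (c :: pvScanGo (pvPairs.take n) t) = true := by
            rw [List.isPrefixOf_iff_prefix]
            intro hcon
            match k, hkne, hp, hcon with
            | kc :: kt, _, hp, hcon =>
              rw [List.cons_prefix_cons] at hcon
              obtain ⟨rfl, hkt⟩ := hcon
              match kt, hkt with
              | [], _ => exact hp (by simp)
              | d :: kt', hkt =>
                have hm : (d :: kt') ∈ pvSUF := by
                  have h2 : (1 : Nat) < (kc :: d :: kt').length := by simp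
                  simpa using fact_key_drop (kc :: d :: kt', v) hkmem 1 (Nat.le_refl 1) h2
                have := scan_transparent n N t (by simpa using hs) _ hm hkt
                exact hp (List.isPrefixOf_iff_prefix.mpr (List.cons_prefix_cons.mpr ⟨rfl, this⟩))
          rw [rep1, if_neg hnp, ih t (by simpa using hs)]

-- A's six passes, composed, equal B's one-pass scan
lemma pv_main (response : String) :
    temper_promises_py response = temper_promises_py_alt response := by
  unfold temper_promises_py temper_promises_py_alt
  have key : ∀ s : List Char,
      rep1 "100%".toList "very likely".toList
        (rep1 "promise you".toList "hope that".toList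
          (rep1 "will fix".toList "could improve".toList
            (rep1 "will cure".toList "might help with".toList
              (rep1 "guaranteed to".toList "could potentially".toList
                (rep1 "will definitely".toList "may".toList s))))) = pvScanGo pvPairs s := by
    intro s
    have c1 : rep1 "will definitely".toList "may".toList s
        = pvScanGo (pvPairs.take 1) s := by
      conv_lhs => rw [← scan_zero s]
      exact step 0 _ _ rfl s.length s (Nat.le_refl _)
    have c2 := step 1 "guaranteed to".toList "could potentially".toList rfl _ s (Nat.le_refl s.length)
    have c3 := step 2 "will cure".toList "might help with".toList rfl _ s (Nat.le_refl s.length)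
    have c4 := step 3 "will fix".toList "could improve".toList rfl _ s (Nat.le_refl s.length)
    have c5 := step 4 "promise you".toList "hope that".toList rfl _ s (Nat.le_refl s.length)
    have c6 := step 5 "100%".toList "very likely".toList rfl _ s (Nat.le_refl s.length)
    rw [c1, c2, c3, c4, c5, c6]; rfl
  have hrep : ∀ (o n : String) (s : List Char), o.toList ≠ [] →
      PySem.Chars.replace s o.toList n.toList = rep1 o.toList n.toList s :=
    fun o n s ho => replace_eq_rep1 _ _ _ ho
  simp only [List.foldl, PySem.Str.replace, String.toList_ofList]
  rw [hrep _ _ _ (by decide), hrep _ _ _ (by decide), hrep _ _ _ (by decide),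
    hrep _ _ _ (by decide), hrep _ _ _ (by decide), hrep _ _ _ (by decide), key]

-- ===== VERDICT (by name: the statement is the Claim_ definition above) =====
theorem temper_promises_py_spec : Claim_equal_temper_promises_py := by
  intro response _
  show temper_promises_py response = temper_promises_py_alt response
  exact pv_main response
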